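-- pv_equiv track=rewrite | github.com/mattscarey/pycrawler | TextData.py | customStrip
-- ===== SOURCE A (Python) =====
-- def customStrip(text):
--     ret = text
--     charactersReplacedBySpace = ["\n", "\t", "     ", "   "]
--     charactersRemoved = [",", "." ,")", "(", ":", ";", "'", '"', "?", "!", "[", "]", " -"]
--     for char in charactersReplacedBySpace:
--         ret = ret.replace(char, " ")
--     for char in charactersRemoved:
--         ret = ret.replace(char, "")
--         ret = ''.join([i for i in ret if not i.isdigit()])
--     return ret.lower()
-- ===== SOURCE B (Python) =====
-- def customStrip(text):
--     ret = text
--     for ch in ["\n", "\t", "     ", "   "]: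
--         ret = ret.replace(ch, " ")
--     # one table-driven pass deletes every punctuation char and every digit at once
--     table = str.maketrans('', '', ",.)(:;'\"?![]0123456789")
--     ret = ret.translate(table)
--     ret = ret.replace(" -", "")
--     return ret.lower()
-- ===== Notes on version B (the rewrite author's own statement) =====
-- stated objective: faster
-- what changed: The loop of 13 sequential replace scans, each followed by a full digit-filtering join pass, is collapsed into one str.translate deletion pass over a table holding the 12 punctuation characters and the 10 digits, followed by the single remaining two-character replace.
import Mathlib
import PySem

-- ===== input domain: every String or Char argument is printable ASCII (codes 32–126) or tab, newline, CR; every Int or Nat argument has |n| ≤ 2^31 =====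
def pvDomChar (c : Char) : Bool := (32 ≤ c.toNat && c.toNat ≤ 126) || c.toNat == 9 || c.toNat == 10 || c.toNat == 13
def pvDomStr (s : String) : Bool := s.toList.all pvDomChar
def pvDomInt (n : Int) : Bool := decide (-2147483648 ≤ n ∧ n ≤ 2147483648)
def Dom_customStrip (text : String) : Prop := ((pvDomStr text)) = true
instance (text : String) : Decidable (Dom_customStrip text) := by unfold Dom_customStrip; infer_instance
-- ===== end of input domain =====

-- B collapses A's 13 sequential replace passes plus 13 digit-filter passes into one table-driven deletion pass (punctuation + digits) followed by the single " -" replace.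

-- ===== PORT A =====
def customStrip (text : String) : String :=
  let ret := text
  let charactersReplacedBySpace : List String := ["\n", "\t", "     ", "   "]
  let charactersRemoved : List String := [",", ".", ")", "(", ":", ";", "'", "\"", "?", "!", "[", "]", " -"]
  let ret := charactersReplacedBySpace.foldl (fun r ch => PySem.Str.replace r ch " ") ret
  let ret := charactersRemoved.foldl (fun r ch =>
    let r := PySem.Str.replace r ch ""
    -- ''.join([i for i in ret if not i.isdigit()])
    String.ofList (r.toList.filter (fun i => !PySem.Chars.isdigit i))) ret
  PySem.Str.lower ret

-- ===== PORT B =====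
def customStrip_alt (text : String) : String :=
  let ret := ["\n", "\t", "     ", "   "].foldl (fun r ch => PySem.Str.replace r ch " ") text
  -- ret.translate(str.maketrans('', '', ",.)(:;'\"?![]0123456789")): one pass deleting every char of the table
  let del : List Char := ",.)(:;'\"?![]0123456789".toList
  let ret := String.ofList (ret.toList.filter (fun c => !del.contains c))
  let ret := PySem.Str.replace ret " -" ""
  PySem.Str.lower ret

-- ===== PRECONDITION & SPEC =====
def Spec_customStrip (text : String) (out : String) : Prop := out = customStrip_alt text
instance (text : String) (out : String) : Decidable (Spec_customStrip text out) := by unfold Spec_customStrip; infer_instance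

-- ===== CLAIM (what is proved, stated in full; the proofs are below) =====
def Claim_equal_customStrip : Prop := ∀ (text : String), Dom_customStrip text → Spec_customStrip text (customStrip text)

-- ===== LEMMAS AND PROOFS =====

-- removing a single-character pattern with '' is filtering that character out
theorem replace_go_single (c : Char) (l acc : List Char) (fuel : Nat) (h : l.length ≤ fuel) :
    PySem.Chars.replace.go [c] [] fuel l acc = acc.reverse ++ l.filter (fun x => x != c) := by
  induction l generalizing fuel acc with
  | nil => cases fuel <;> simp [PySem.Chars.replace.go]
  | cons a t ih =>
    cases fuel with
    | zero => simp at h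
    | succ f =>
      rw [PySem.Chars.replace.go]
      simp only [List.isPrefixOf, Bool.and_true]
      by_cases hac : a = c
      · subst hac
        simp only [beq_self_eq_true, if_pos, List.length_cons, List.length_nil, Nat.zero_add,
          List.drop_one, List.tail_cons, List.reverse_nil, List.nil_append]
        rw [ih _ f (by simpa using Nat.le_of_succ_le_succ h)]
        simp
      · have hc : (c == a) = false := beq_eq_false_iff_ne.mpr (Ne.symm hac)
        simp only [hc, Bool.false_eq_true, reduceIte]
        rw [ih _ f (by simpa using Nat.le_of_succ_le_succ h)]
        simp [hac]

theorem replace_single (c : Char) (l : List Char) :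
    PySem.Chars.replace l [c] [] = l.filter (fun x => x != c) := by
  rw [PySem.Chars.replace]
  simp only [List.isEmpty_cons, Bool.false_eq_true, reduceIte]
  exact replace_go_single c l [] l.length le_rfl

-- replacement by '' only deletes: every char of the result was in the input
theorem mem_replace_go_empty (old : List Char) (fuel : Nat) (l acc : List Char) (x : Char)
    (hx : x ∈ PySem.Chars.replace.go old [] fuel l acc) : x ∈ acc ∨ x ∈ l := by
  induction fuel generalizing l acc with
  | zero => simp [PySem.Chars.replace.go] at hx; tauto
  | succ f ih =>
    cases l with
    | nil => simp [PySem.Chars.replace.go] at hx; tauto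
    | cons a t =>
      rw [PySem.Chars.replace.go] at hx
      split at hx
      · rcases ih _ _ hx with h | h
        · simp at h; tauto
        · right; exact List.mem_of_mem_drop h
      · rcases ih _ _ hx with h | h
        · simp at h; rcases h with h | h
          · subst h; simp
          · tauto
        · simp [h]

theorem mem_replace_empty (old l : List Char) (x : Char)
    (hx : x ∈ PySem.Chars.replace l old []) : x ∈ l := by
  rw [PySem.Chars.replace] at hx
  by_cases he : old.isEmpty
  · simp only [he, if_pos, List.nil_append] at hx
    simp only [List.mem_flatMap, List.mem_cons, List.not_mem_nil, or_false] at hx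
    obtain ⟨c, hc, rfl⟩ := hx
    exact hc
  · simp only [he, Bool.false_eq_true, reduceIte] at hx
    rcases mem_replace_go_empty old l.length l [] x hx with h | h
    · simp at h
    · exact h

-- membership in the ten digit characters is exactly isdigit
theorem digit_contains (x : Char) :
    (['0','1','2','3','4','5','6','7','8','9'].contains x) = PySem.Chars.isdigit x := by
  rw [Bool.eq_iff_iff]
  simp only [List.contains_cons, List.contains_nil, Bool.or_false, Bool.or_eq_true, beq_iff_eq,
    PySem.Chars.isdigit, Bool.and_eq_true, decide_eq_true_eq]
  constructor
  · rintro (rfl|rfl|rfl|rfl|rfl|rfl|rfl|rfl|rfl|rfl) <;> exact ⟨by decide, by decide⟩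
  · rintro ⟨h1, h2⟩
    have h1' : 48 ≤ x.toNat := UInt32.le_iff_toNat_le.mp h1
    have h2' : x.toNat ≤ 57 := UInt32.le_iff_toNat_le.mp h2
    have hx : x = Char.ofNat x.toNat := (Char.ofNat_toNat x).symm
    have hv : x.toNat = 48 ∨ x.toNat = 49 ∨ x.toNat = 50 ∨ x.toNat = 51 ∨ x.toNat = 52 ∨
        x.toNat = 53 ∨ x.toNat = 54 ∨ x.toNat = 55 ∨ x.toNat = 56 ∨ x.toNat = 57 := by omega
    rcases hv with h|h|h|h|h|h|h|h|h|h <;> rw [hx, h] <;> decide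

-- A's accumulated 12 single-character filters + digit filters equal B's one table filter
theorem predA_eq (w : List Char) :
    w.filter (fun a => !PySem.Chars.isdigit a &&
      (a != ']' && (!PySem.Chars.isdigit a && (a != '[' && (!PySem.Chars.isdigit a &&
      (a != '!' && (!PySem.Chars.isdigit a && (a != '?' && (!PySem.Chars.isdigit a &&
      (a != '"' && (!PySem.Chars.isdigit a && (a != '\'' && (!PySem.Chars.isdigit a &&
      (a != ';' && (!PySem.Chars.isdigit a && (a != ':' && (!PySem.Chars.isdigit a &&
      (a != '(' && (!PySem.Chars.isdigit a && (a != ')' && (!PySem.Chars.isdigit a &&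
      (a != '.' && (!PySem.Chars.isdigit a && a != ','))))))))))))))))))))))) =
    w.filter (fun c => !([',','.',')','(',':',';','\'','"','?','!','[',']',
      '0','1','2','3','4','5','6','7','8','9'].contains c)) := by
  apply List.filter_congr
  intro x _
  have hdig : PySem.Chars.isdigit x = false ↔
      (¬x = '0' ∧ ¬x = '1' ∧ ¬x = '2' ∧ ¬x = '3' ∧ ¬x = '4' ∧ ¬x = '5' ∧ ¬x = '6' ∧ ¬x = '7' ∧
       ¬x = '8' ∧ ¬x = '9') := by
    rw [← digit_contains]
    simp only [List.contains_cons, List.contains_nil, Bool.or_false, Bool.or_eq_false_iff,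
      beq_eq_false_iff_ne, ne_eq]
  rw [Bool.eq_iff_iff]
  simp only [Bool.and_eq_true, bne_iff_ne, ne_eq, Bool.not_eq_true', List.contains_cons,
    List.contains_nil, Bool.or_false, Bool.or_eq_false_iff, beq_eq_false_iff_ne, hdig]
  tauto

-- the result of the " -" replace on a digit-free string is digit-free
theorem no_digit_after (l : List Char)
    (hl : ∀ a ∈ l, PySem.Chars.isdigit a = false) :
    List.filter (fun i => !PySem.Chars.isdigit i) (PySem.Chars.replace l [' ', '-'] []) =
    PySem.Chars.replace l [' ', '-'] [] := by
  apply List.filter_eq_self.mpr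
  intro a ha
  simp only [Bool.not_eq_eq_eq_not, Bool.not_true]
  exact hl a (mem_replace_empty _ _ _ ha)

-- push Str.replace through String.ofList for the " -" pattern
theorem str_replace_ofList (l : List Char) :
    PySem.Str.replace (String.ofList l) " -" "" =
    String.ofList (PySem.Chars.replace l [' ', '-'] []) := by
  conv_lhs => rw [← String.ofList_toList (s := PySem.Str.replace (String.ofList l) " -" "")]
  rw [PySem.Str.toList_replace, String.toList_ofList]
  rfl

-- ===== VERDICT (by name: the statement is the Claim_ definition above) =====
theorem customStrip_spec : Claim_equal_customStrip := by
  intro text _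
  unfold Spec_customStrip customStrip customStrip_alt
  simp only [List.foldl_cons, List.foldl_nil]
  simp only [PySem.Str.toList_replace, String.toList_ofList]
  simp only [show ("," : String).toList = [','] from rfl,
    show ("." : String).toList = ['.'] from rfl,
    show (")" : String).toList = [')'] from rfl,
    show ("(" : String).toList = ['('] from rfl,
    show (":" : String).toList = [':'] from rfl,
    show (";" : String).toList = [';'] from rfl,
    show ("'" : String).toList = ['\''] from rfl,
    show ("\"" : String).toList = ['"'] from rfl,
    show ("?" : String).toList = ['?'] from rfl,
    show ("!" : String).toList = ['!'] from rfl,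
    show ("[" : String).toList = ['['] from rfl,
    show ("]" : String).toList = [']'] from rfl,
    show ("" : String).toList = [] from rfl,
    show (" -" : String).toList = [' ', '-'] from rfl,
    show (",.)(:;'\"?![]0123456789" : String).toList =
      [',','.',')','(',':',';','\'','"','?','!','[',']','0','1','2','3','4','5','6','7','8','9'] from rfl]
  simp only [replace_single, List.filter_filter]
  rw [str_replace_ofList, predA_eq, no_digit_after]
  intro a ha
  have := (List.mem_filter.mp ha).2
  simp only [List.contains_cons, List.contains_nil, Bool.or_false, Bool.not_eq_true',
    Bool.or_eq_false_iff, beq_eq_false_iff_ne, ne_eq] at this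
  rw [← digit_contains]
  simp only [List.contains_cons, List.contains_nil, Bool.or_false, Bool.or_eq_false_iff,
    beq_eq_false_iff_ne, ne_eq]
  tauto
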